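-- pv_equiv track=rewrite | github.com/Ilovehiking9/word-unscrambler | words.py | Word2Vect
-- ===== SOURCE A (Python) =====
-- def Word2Vect(Word):
--     l = ['a','b','c','d','e','f','g','h','i','j','k','l','m','n','o','p','q','r','s','t','u','v','w','x','y','z']
--     v = [0, 0, 0, 0, 0, 0, 0, 0, 0, 0, 0, 0, 0, 0, 0, 0, 0, 0, 0, 0, 0, 0, 0, 0, 0, 0]
--     w = Word.lower()
--     wl = list(w)
--     for i in range(0, len(wl)):
--         if wl[i] in l:
--             ind = l.index(wl[i])
--             v[ind] += 1
--     return v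
-- ===== SOURCE B (Python) =====
-- def Word2Vect(Word):
--     w = Word.lower()
--     return [w.count(c) for c in 'abcdefghijklmnopqrstuvwxyz']
-- ===== Notes on version B (the rewrite author's own statement) =====
-- stated objective: idiomatic
-- what changed: Replaces the per-character pass with list membership test, list.index and in-place vector increments by a comprehension over the fixed alphabet string that counts each letter with str.count, inverting the loop nesting and dropping all index bookkeeping.
import Mathlib
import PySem

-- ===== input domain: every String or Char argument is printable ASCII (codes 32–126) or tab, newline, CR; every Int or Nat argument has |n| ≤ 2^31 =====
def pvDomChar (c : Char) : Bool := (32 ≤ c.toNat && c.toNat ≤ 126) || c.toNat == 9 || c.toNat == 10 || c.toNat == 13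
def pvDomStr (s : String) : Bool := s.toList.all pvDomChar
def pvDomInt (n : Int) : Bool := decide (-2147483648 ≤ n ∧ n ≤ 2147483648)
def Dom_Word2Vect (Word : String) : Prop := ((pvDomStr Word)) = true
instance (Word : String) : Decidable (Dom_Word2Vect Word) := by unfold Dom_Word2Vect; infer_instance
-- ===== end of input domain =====

-- B replaces A's single pass with per-character membership/index/increment bookkeeping by an
-- idiomatic comprehension over the alphabet counting each letter with str.count (same cost class).

-- ===== PORT A =====
-- the literal alphabet list A builds
def pvAlph : List Char :=
  ['a','b','c','d','e','f','g','h','i','j','k','l','m','n','o','p','q','r','s','t','u','v','w','x','y','z']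

-- the body of A's for-loop: membership test, l.index, v[ind] += 1
def pvStep (v : List Int) (c : Char) : List Int :=
  if c ∈ pvAlph then
    match PySem.List.index? pvAlph c with
    | some ind => PySem.List.pySetD v (ind : Int) (PySem.List.pyGetD v (ind : Int) 0 + 1)
    | none => v
  else v

def Word2Vect (Word : String) : List Int :=
  let l := pvAlph
  let v : List Int := [0,0,0,0,0,0,0,0,0,0,0,0,0,0,0,0,0,0,0,0,0,0,0,0,0,0]
  let w := PySem.Str.lower Word
  let wl := w.toList
  (PySem.List.pyRange 0 (PySem.List.len wl) 1).foldl
    (fun v i => pvStep v (PySem.List.pyGetD wl i ' ')) v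

-- ===== PORT B =====
def Word2Vect_alt (Word : String) : List Int :=
  let w := PySem.Str.lower Word
  "abcdefghijklmnopqrstuvwxyz".toList.map (fun c => (PySem.Str.count w (String.singleton c) : Int))

-- ===== PRECONDITION & SPEC =====
def Spec_Word2Vect (Word : String) (out : List Int) : Prop := out = Word2Vect_alt Word
instance (Word : String) (out : List Int) : Decidable (Spec_Word2Vect Word out) := by unfold Spec_Word2Vect; infer_instance

-- ===== CLAIM (what is proved, stated in full; the proofs are below) =====
def Claim_equal_Word2Vect : Prop := ∀ (Word : String), Dom_Word2Vect Word → Spec_Word2Vect Word (Word2Vect Word)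

-- ===== LEMMAS AND PROOFS =====

-- the alphabet letter at position j (total form used by the proofs)
def pvA (j : Nat) : Char := pvAlph.getD j ' '

lemma pvAlph_length : pvAlph.length = 26 := by decide

lemma pvA_mem (j : Nat) (hj : j < 26) : pvA j ∈ pvAlph := by
  unfold pvA
  rw [List.getD_eq_getElem pvAlph ' ' (by rw [pvAlph_length]; exact hj)]
  exact List.getElem_mem _

lemma pvStep_length (v : List Int) (c : Char) : (pvStep v c).length = v.length := by
  unfold pvStep
  split_ifs with h
  · rcases hk : PySem.List.index? pvAlph c with _ | k
    · rfl
    · simp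
  · rfl

lemma pvLoop_length (cs : List Char) (v : List Int) :
    (cs.foldl pvStep v).length = v.length := by
  induction cs generalizing v with
  | nil => rfl
  | cons c cs ih => simp [List.foldl_cons, ih, pvStep_length]

lemma pvStep_get (v : List Int) (c : Char) (hv : v.length = 26) (j : Nat) (hj : j < 26) :
    PySem.List.pyGetD (pvStep v c) (j : Int) 0 =
      PySem.List.pyGetD v (j : Int) 0 + (if pvA j = c then 1 else 0) := by
  by_cases h : c ∈ pvAlph
  · have hidx : (PySem.List.index? pvAlph c).isSome := by
      rw [PySem.List.index?_isSome_iff]; exact h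
    obtain ⟨k, hk⟩ := Option.isSome_iff_exists.mp hidx
    obtain ⟨hklt, hkc, _⟩ := PySem.List.getElem_of_index?_eq_some hk
    have hnd : pvAlph.Nodup := by decide
    have hkv : k < v.length := by rw [hv]; exact pvAlph_length ▸ hklt
    unfold pvStep
    rw [if_pos h, hk]
    simp only []
    rw [show ((k : Int)) = ((k : Nat) : Int) from rfl]
    rw [PySem.List.pyGetD_pySetD_natCast v k j _ _ hkv]
    by_cases hjk : j = k
    · subst hjk
      have : pvA j = c := by
        unfold pvA
        rw [List.getD_eq_getElem pvAlph ' ' hklt]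
        exact hkc
      simp [this]
    · have : pvA j ≠ c := by
        intro hc
        apply hjk
        have hjlt : j < pvAlph.length := by rw [pvAlph_length]; exact hj
        have : pvAlph[j]'hjlt = pvAlph[k]'hklt := by
          rw [hkc, ← hc]
          unfold pvA
          rw [List.getD_eq_getElem pvAlph ' ' hjlt]
        exact hnd.getElem_inj_iff.mp this
      simp [hjk, this]
  · have hstep : pvStep v c = v := by unfold pvStep; rw [if_neg h]
    have : pvA j ≠ c := fun hc => h (hc ▸ pvA_mem j hj)
    simp [hstep, this]

lemma pvLoop_get (cs : List Char) : ∀ (v : List Int) (hv : v.length = 26) (j : Nat) (hj : j < 26),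
    PySem.List.pyGetD (cs.foldl pvStep v) (j : Int) 0 =
      PySem.List.pyGetD v (j : Int) 0 + (cs.count (pvA j) : Int) := by
  induction cs with
  | nil => intro v hv j hj; simp
  | cons c cs ih =>
    intro v hv j hj
    rw [List.foldl_cons, ih (pvStep v c) (by rw [pvStep_length, hv]) j hj,
      pvStep_get v c hv j hj, List.count_cons]
    push_cast
    by_cases hc : pvA j = c
    · simp only [hc, if_pos, BEq.rfl]
      simp
      ring
    · have : ¬ (c == pvA j) = true := by
        simp; intro h; exact hc (Eq.symm h)
      simp [hc, this]

lemma pvCount_go_singleton (c : Char) (s : List Char) : ∀ (fuel acc : Nat), s.length ≤ fuel →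
    PySem.Chars.count.go [c] fuel s acc = acc + s.count c := by
  induction s with
  | nil =>
    intro fuel acc _
    cases fuel <;> simp [PySem.Chars.count.go]
  | cons h t ih =>
    intro fuel acc hf
    cases fuel with
    | zero => simp at hf
    | succ fuel =>
      have ht : t.length ≤ fuel := by simpa using hf
      by_cases hch : c = h
      · subst hch
        simp only [PySem.Chars.count.go]
        rw [if_pos (by simp [List.isPrefixOf])]
        simp only [List.length_cons, List.length_nil, List.drop_succ_cons, List.drop_zero]
        rw [ih fuel (acc + 1) ht]
        simp
        omega
      · simp only [PySem.Chars.count.go]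
        rw [if_neg (by simp [List.isPrefixOf]; intro hb; exact hch (by simpa using hb))]
        rw [ih fuel acc ht]
        simp [List.count_cons]
        intro hb
        exact absurd (by simpa using hb) (fun h' => hch (Eq.symm h'))

lemma pvCount_singleton (s : List Char) (c : Char) :
    PySem.Chars.count s [c] = s.count c := by
  unfold PySem.Chars.count
  simp only [List.isEmpty_cons, if_false, Bool.false_eq_true]
  simpa using pvCount_go_singleton c s s.length 0 le_rfl

lemma pvAlph_str : "abcdefghijklmnopqrstuvwxyz".toList = pvAlph := by decide

-- ===== VERDICT (by name: the statement is the Claim_ definition above) =====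
theorem Word2Vect_spec : Claim_equal_Word2Vect := by
  intro Word _
  unfold Spec_Word2Vect Word2Vect Word2Vect_alt
  simp only []
  rw [show (PySem.List.len (PySem.Str.lower Word).toList) = (((PySem.Str.lower Word).toList.length : Nat) : Int) from by simp [PySem.List.len_eq]]
  rw [PySem.List.foldl_pyRange_zero_pyGetD' (PySem.Str.lower Word).toList ' ' pvStep]
  set wl := (PySem.Str.lower Word).toList with hwl
  apply List.ext_getElem
  · rw [pvLoop_length, pvAlph_str]; simp [pvAlph_length]
  · intro j hj hj2
    have hj26 : j < 26 := by
      rw [pvLoop_length] at hj; simpa using hj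
    have hA : (wl.foldl pvStep [0,0,0,0,0,0,0,0,0,0,0,0,0,0,0,0,0,0,0,0,0,0,0,0,0,0])[j]'hj
        = PySem.List.pyGetD (wl.foldl pvStep [0,0,0,0,0,0,0,0,0,0,0,0,0,0,0,0,0,0,0,0,0,0,0,0,0,0]) (j : Int) 0 :=
      by rw [PySem.List.pyGetD_natCast]; exact (List.getD_eq_getElem _ _ hj).symm
    rw [hA, pvLoop_get wl _ rfl j hj26, List.getElem_map]
    have hcj : j < "abcdefghijklmnopqrstuvwxyz".toList.length := by
      rw [pvAlph_str, pvAlph_length]; exact hj26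
    have hchar : ("abcdefghijklmnopqrstuvwxyz".toList)[j]'hcj = pvA j := by
      rw [List.getElem_of_eq pvAlph_str hcj]
      unfold pvA
      rw [List.getD_eq_getElem pvAlph ' ' (by rw [pvAlph_length]; exact hj26)]
    rw [hchar, PySem.Str.count_eq]
    have hsing : (String.singleton (pvA j)).toList = [pvA j] := by simp
    rw [hsing, ← hwl, pvCount_singleton]
    have hz : PySem.List.pyGetD ([0,0,0,0,0,0,0,0,0,0,0,0,0,0,0,0,0,0,0,0,0,0,0,0,0,0] : List Int) (j : Int) 0 = 0 := by
      rw [PySem.List.pyGetD_natCast]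
      interval_cases j <;> rfl
    rw [hz]
    ring
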